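-- pv_equiv track=rewrite | github.com/jsurany/bb_mentor_meetings | meeting_three.py | good_longest_streak
-- ===== SOURCE A (Python) =====
-- def good_longest_streak(arr: list[int]) -> int:
--     # convert list of 1s and 0s to sequence of tuples
--     curr, streak, seq = arr[0], 1, []
--     for val in arr[1:]:
--         if curr != val:
--             seq.append((streak, curr))
--             curr, streak = val, 1
--         else:
--             streak += 1
--     seq.append((streak, curr))
--
--     # iterate over tuples, getting largest streak
--     idx_max, val_max = -1, 0
--     idx_curr, len_seq = 0, len(seq)
--     for idx, (streak, val) in enumerate(seq):
--         if val == 1: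
--             idx_curr += streak
--             continue
--
--         left = seq[idx - 1][0] if idx > 0 else 0
--         right = seq[idx + 1][0] if idx < len_seq - 1 else 0
--
--         if streak == 1:
--             val_curr = left + right + 1
--             idx_zero = idx_curr
--         else:
--             if left >= right:
--                 val_curr = left + 1
--                 idx_zero = idx_curr  # zero at beginning for left streak
--             else:
--                 val_curr = right + 1
--                 idx_zero = idx_curr + streak - 1  # zero at end for right streak
--             # if left is larger, we need
--             val_curr = max(left, right) + 1
--         idx_curr += streak
--
--         # check and set the max if needed
--         if val_curr > val_max:
--             val_max = val_curr
--             idx_max = idx_zero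
--     return idx_max
-- ===== SOURCE B (Python) =====
-- def good_longest_streak(arr: list[int]) -> int:
--     # One fused pass over arr: peel maximal runs in place (no run-tuple list),
--     # look ahead one run for the right-neighbour length, keep a strict-greater max.
--     best_idx, best_val = -1, 0
--     n = len(arr)
--     i = 0
--     left = 0  # length of the run just before position i (0 at the start)
--     while i < n:
--         j = i + 1
--         while j < n and arr[j] == arr[i]:
--             j += 1
--         streak = j - i
--         if arr[i] != 1:
--             if j < n:
--                 k = j + 1
--                 while k < n and arr[k] == arr[j]:
--                     k += 1
--                 right = k - j
--             else:
--                 right = 0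
--             if streak == 1:
--                 val_curr, idx_zero = left + right + 1, i
--             elif left >= right:
--                 val_curr, idx_zero = left + 1, i
--             else:
--                 val_curr, idx_zero = right + 1, i + streak - 1
--             if val_curr > best_val:
--                 best_val, best_idx = val_curr, idx_zero
--         left = streak
--         i = j
--     return best_idx
-- ===== Notes on version B (the rewrite author's own statement) =====
-- stated objective: alternative
-- what changed: A compresses arr into an explicit run-length tuple list and then re-scans that list with enumerate and global index lookups for the neighbour runs; B is a single fused pass over arr that peels each maximal run in place with a one-run lookahead for the right neighbour, keeping only the previous run length and the running best, with no intermediate list.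
-- crash fix: On the empty list A raises IndexError (arr[0]); B returns -1, meaning no index to flip. — e.g. on good_longest_streak([]): A raises IndexError, B returns -1
import Mathlib
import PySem

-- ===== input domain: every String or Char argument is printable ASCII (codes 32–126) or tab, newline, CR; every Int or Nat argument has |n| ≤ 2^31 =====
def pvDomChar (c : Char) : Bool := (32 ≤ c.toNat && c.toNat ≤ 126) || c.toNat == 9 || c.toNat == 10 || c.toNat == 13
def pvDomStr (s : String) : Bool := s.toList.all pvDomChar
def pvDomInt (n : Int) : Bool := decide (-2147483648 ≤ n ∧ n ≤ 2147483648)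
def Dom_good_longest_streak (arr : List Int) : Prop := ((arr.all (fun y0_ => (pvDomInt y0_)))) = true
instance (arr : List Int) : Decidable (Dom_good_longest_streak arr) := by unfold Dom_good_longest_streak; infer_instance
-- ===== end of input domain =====

-- B replaces A's two-phase pipeline (build a run-length tuple list, then re-scan it with
-- global indexing) by one fused pass over arr that peels runs in place with a one-run
-- lookahead — no intermediate list (objective: alternative, same O(n) cost).

-- ===== PORT A =====
-- first loop body: run-length compression step
def aStep1 (st : Int × Int × List (Int × Int)) (val : Int) : Int × Int × List (Int × Int) :=
  if st.1 ≠ val then (val, 1, st.2.2 ++ [(st.2.1, st.1)]) else (st.1, st.2.1 + 1, st.2.2)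

-- second loop body: state (idx_max, val_max, idx_curr), element (idx, (streak, val))
def aStep2 (seq : List (Int × Int)) (lenSeq : Int) (st : Int × Int × Int)
    (p : Int × Int × Int) : Int × Int × Int :=
  let idx := p.1; let streak := p.2.1; let v := p.2.2
  let idxMax := st.1; let valMax := st.2.1; let idxCurr := st.2.2
  if v = 1 then (idxMax, valMax, idxCurr + streak)
  else
    let left : Int := if idx > 0 then ((PySem.List.pyGet? seq (idx - 1)).getD (0, 0)).1 else 0
    let right : Int := if idx < lenSeq - 1 then ((PySem.List.pyGet? seq (idx + 1)).getD (0, 0)).1 else 0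
    let vz : Int × Int :=
      if streak = 1 then (left + right + 1, idxCurr)
      else (max left right + 1, if left ≥ right then idxCurr else idxCurr + streak - 1)
    let idxCurr' := idxCurr + streak
    if vz.1 > valMax then (vz.2, vz.1, idxCurr') else (idxMax, valMax, idxCurr')

def good_longest_streak (arr : List Int) : Int :=
  match arr with
  | [] => 0  -- arr[0] raises IndexError in Python; excluded by Pre_
  | a :: rest =>
    let st := rest.foldl aStep1 (a, 1, ([] : List (Int × Int)))
    let seq := st.2.2 ++ [(st.2.1, st.1)]
    ((PySem.List.enumerate seq 0).foldl (aStep2 seq (seq.length : Int)) (-1, 0, 0)).1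

-- ===== PORT B =====
-- fused single pass: best = (best_idx, best_val), left = previous run length, i = index of run start
def bGo : List Int → Int × Int → Int → Int → Int
  | [], best, _, _ => best.1
  | x :: xs, best, left, i =>
    let r := xs.takeWhile (fun y => y == x)        -- inner `while j < n and arr[j] == arr[i]`
    let rest := xs.dropWhile (fun y => y == x)
    let streak : Int := 1 + (r.length : Int)
    let best' :=
      if x ≠ 1 then
        let right : Int :=                          -- lookahead `while k < n and arr[k] == arr[j]`
          match rest with
          | [] => 0
          | y :: ys => 1 + ((ys.takeWhile (fun z => z == y)).length : Int)
        let vz : Int × Int :=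
          if streak = 1 then (left + right + 1, i)
          else if left ≥ right then (left + 1, i)
          else (right + 1, i + streak - 1)
        if vz.1 > best.2 then (vz.2, vz.1) else best
      else best
    bGo rest best' streak (i + streak)
  termination_by l => l.length
  decreasing_by
    simpa using Nat.lt_succ_of_le (List.length_dropWhile_le _ _)

def good_longest_streak_alt (arr : List Int) : Int := bGo arr (-1, 0) 0 0

-- ===== PRECONDITION & SPEC =====
-- Pre_ excludes only the empty list, on which A raises IndexError (arr[0]).
def Pre_good_longest_streak (arr : List Int) : Prop := arr ≠ []
instance (arr : List Int) : Decidable (Pre_good_longest_streak arr) := by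
  unfold Pre_good_longest_streak; infer_instance
def pvWitness_good_longest_streak : List Int := [1, 0, 1]

-- A raises IndexError on the empty list; B returns -1 (no flippable index) there.
def Raises_good_longest_streak (arr : List Int) : Prop := arr = []
instance (arr : List Int) : Decidable (Raises_good_longest_streak arr) := by
  unfold Raises_good_longest_streak; infer_instance
def pvRaiseWitness_good_longest_streak : List Int := []
def pvRaiseWitnessOut_good_longest_streak : Int := -1

def Spec_good_longest_streak (arr : List Int) (out : Int) : Prop := out = good_longest_streak_alt arr
instance (arr : List Int) (out : Int) : Decidable (Spec_good_longest_streak arr out) := by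
  unfold Spec_good_longest_streak; infer_instance

-- ===== CLAIM (what is proved, stated in full; the proofs are below) =====
def Claim_equal_good_longest_streak : Prop := ∀ (arr : List Int), Dom_good_longest_streak arr → Pre_good_longest_streak arr → Spec_good_longest_streak arr (good_longest_streak arr)
def Claim_raises_good_longest_streak : Prop := (∀ (arr : List Int), Dom_good_longest_streak arr → Raises_good_longest_streak arr → ¬ Pre_good_longest_streak arr) ∧ (Dom_good_longest_streak (pvRaiseWitness_good_longest_streak) ∧ Raises_good_longest_streak (pvRaiseWitness_good_longest_streak) ∧ good_longest_streak_alt (pvRaiseWitness_good_longest_streak) = pvRaiseWitnessOut_good_longest_streak)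

-- ===== LEMMAS AND PROOFS =====

-- run-length list of arr, by run peeling (shape of B's outer loop)
def rle : List Int → List (Int × Int)
  | [] => []
  | x :: xs =>
    (1 + ((xs.takeWhile (fun y => y == x)).length : Int), x) :: rle (xs.dropWhile (fun y => y == x))
  termination_by l => l.length
  decreasing_by
    simpa using Nat.lt_succ_of_le (List.length_dropWhile_le _ _)

-- run-length list of arr, element-wise with an open run (shape of A's first loop)
def runsFrom (c k : Int) : List Int → List (Int × Int)
  | [] => [(k, c)]
  | x :: xs => if c ≠ x then (k, c) :: runsFrom x 1 xs else runsFrom c (k + 1) xs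

-- right-neighbour run length seen from the head of the remaining run list
def rightOf : List (Int × Int) → Int
  | [] => 0
  | (s2, _) :: _ => s2

-- common evaluation over the run list: best = (idx_max, val_max)
def runsEval : List (Int × Int) → Int × Int → Int → Int → Int
  | [], best, _, _ => best.1
  | (streak, v) :: rest, best, left, start =>
    let best' :=
      if v ≠ 1 then
        let right : Int := rightOf rest
        let vz : Int × Int :=
          if streak = 1 then (left + right + 1, start)
          else if left ≥ right then (left + 1, start)
          else (right + 1, start + streak - 1)
        if vz.1 > best.2 then (vz.2, vz.1) else best
      else best
    runsEval rest best' streak (start + streak)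

theorem bGo_nil (best : Int × Int) (left i : Int) : bGo [] best left i = best.1 := by
  rw [bGo.eq_def]

theorem bGo_cons (x : Int) (xs : List Int) (best : Int × Int) (left i : Int) :
    bGo (x :: xs) best left i =
      (let rest := xs.dropWhile (fun y => y == x)
       let streak : Int := 1 + ((xs.takeWhile (fun y => y == x)).length : Int)
       let best' :=
        if x ≠ 1 then
          let right : Int :=
            match rest with
            | [] => 0
            | y :: ys => 1 + ((ys.takeWhile (fun z => z == y)).length : Int)
          let vz : Int × Int :=
            if streak = 1 then (left + right + 1, i)
            else if left ≥ right then (left + 1, i)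
            else (right + 1, i + streak - 1)
          if vz.1 > best.2 then (vz.2, vz.1) else best
        else best
       bGo rest best' streak (i + streak)) := by
  rw [bGo.eq_def]

theorem bGo_eq_runsEval : ∀ (n : Nat) (l : List Int), l.length ≤ n → ∀ (best : Int × Int) (left i : Int),
    bGo l best left i = runsEval (rle l) best left i := by
  intro n
  induction n with
  | zero =>
    intro l hl best left i
    have : l = [] := List.eq_nil_of_length_eq_zero (Nat.le_zero.mp hl)
    subst this
    simp [bGo_nil, rle, runsEval]
  | succ n ih =>
    intro l hl best left i
    match l with
    | [] => simp [bGo_nil, rle, runsEval]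
    | x :: xs =>
      rw [bGo_cons, rle]
      simp only [runsEval]
      have hlen : (xs.dropWhile (fun y => y == x)).length ≤ n := by
        have := List.length_dropWhile_le (fun y => y == x) xs
        simp at hl; omega
      rw [ih _ hlen]
      cases hrest : xs.dropWhile (fun y => y == x) with
      | nil => simp [rle, rightOf]
      | cons y ys => rw [rle]; simp [rightOf]

theorem runsFrom_eq_rle : ∀ (l : List Int) (c k : Int),
    runsFrom c k l
      = (k + ((l.takeWhile (fun y => y == c)).length : Int), c) :: rle (l.dropWhile (fun y => y == c)) := by
  intro l
  induction l with
  | nil => intro c k; simp [runsFrom, rle]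
  | cons x xs ih =>
    intro c k
    by_cases h : c = x
    · subst h
      simp [runsFrom, ih c (k + 1)]
      omega
    · have hb : (x == c) = false := by simp [Ne.symm h]
      simp only [runsFrom, if_pos h, List.takeWhile_cons, List.dropWhile_cons, hb,
        Bool.false_eq_true, if_false]
      rw [rle, ih x 1]
      simp

theorem seq_eq_runsFrom : ∀ (rest : List Int) (c s : Int) (q : List (Int × Int)),
    (rest.foldl aStep1 (c, s, q)).2.2
        ++ [((rest.foldl aStep1 (c, s, q)).2.1, (rest.foldl aStep1 (c, s, q)).1)]
      = q ++ runsFrom c s rest := by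
  intro rest
  induction rest with
  | nil => intro c s q; simp [runsFrom]
  | cons x xs ih =>
    intro c s q
    by_cases h : c = x
    · subst h
      simp only [List.foldl_cons, aStep1, ne_eq, not_true_eq_false, if_false]
      rw [ih, runsFrom]
      simp
    · simp only [List.foldl_cons, aStep1, ne_eq, if_pos h]
      rw [ih, runsFrom]
      simp [h, List.append_assoc]

def lastLen (pre : List (Int × Int)) : Int := (pre.getLast?.getD (0, 0)).1

theorem left_eq (pre t : List (Int × Int)) :
    (if ((pre.length : Int)) > 0
      then ((PySem.List.pyGet? (pre ++ t) ((pre.length : Int) - 1)).getD (0, 0)).1 else 0)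
      = lastLen pre := by
  match pre with
  | [] => simp [lastLen]
  | p :: ps =>
    rw [if_pos (by exact_mod_cast ps.length.succ_pos)]
    have h1 : (((p :: ps : List (Int × Int)).length : Int)) - 1 = ((ps.length : Nat) : Int) := by
      simp
    rw [h1, PySem.List.pyGet?_natCast, List.getElem?_append_left (by simp)]
    have h2 : ((p :: ps : List (Int × Int))[ps.length]?) = (p :: ps).getLast? := by
      rw [List.getLast?_eq_getElem?]; simp
    rw [h2]; rfl

theorem right_eq (pre : List (Int × Int)) (a : Int × Int) (t' : List (Int × Int)) :
    (if ((pre.length : Int)) < ((pre ++ a :: t').length : Int) - 1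
      then ((PySem.List.pyGet? (pre ++ a :: t') ((pre.length : Int) + 1)).getD (0, 0)).1 else 0)
      = rightOf t' := by
  match t' with
  | [] => rw [if_neg (by simp)]; rfl
  | (s2, v2) :: t'' =>
    rw [if_pos (by simp; omega)]
    have h1 : ((pre.length : Int)) + 1 = (((pre.length + 1 : Nat)) : Int) := by push_cast; ring
    rw [h1, PySem.List.pyGet?_natCast, List.getElem?_append_right (by omega)]
    simp [rightOf]

theorem foldA_eq_runsEval : ∀ (t pre : List (Int × Int)) (idxMax valMax idxCurr : Int),
    ((PySem.List.enumerate t (pre.length : Int)).foldl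
        (aStep2 (pre ++ t) ((pre ++ t).length : Int)) (idxMax, valMax, idxCurr)).1
      = runsEval t (idxMax, valMax) (lastLen pre) idxCurr := by
  intro t
  induction t with
  | nil => intro pre iM vM iC; simp [PySem.List.enumerate, runsEval]
  | cons hd t' ih =>
    obtain ⟨streak, v⟩ := hd
    intro pre iM vM iC
    rw [PySem.List.enumerate_cons, List.foldl_cons]
    have hstep : aStep2 (pre ++ (streak, v) :: t') ((pre ++ (streak, v) :: t').length : Int)
        (iM, vM, iC) ((pre.length : Int), (streak, v))
      = (let best' :=
          if v ≠ 1 then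
            let right : Int := rightOf t'
            let vz : Int × Int :=
              if streak = 1 then (lastLen pre + right + 1, iC)
              else if lastLen pre ≥ right then (lastLen pre + 1, iC)
              else (right + 1, iC + streak - 1)
            if vz.1 > vM then (vz.2, vz.1) else (iM, vM)
          else (iM, vM)
         (best'.1, best'.2, iC + streak)) := by
      by_cases hv : v = 1
      · simp [aStep2, hv]
      · simp only [aStep2, hv, if_neg, ne_eq, not_false_eq_true, if_true]
        rw [left_eq pre ((streak, v) :: t'), right_eq pre (streak, v) t']
        split_ifs <;> simp_all <;> omega
    rw [hstep]
    simp only [runsEval]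
    have hlen : ((pre.length : Int)) + 1 = (((pre ++ [(streak, v)]).length : Nat) : Int) := by
      simp
    have happ : pre ++ (streak, v) :: t' = (pre ++ [(streak, v)]) ++ t' := by simp
    rw [hlen, happ, ih ((pre ++ [(streak, v)]))]
    have hlast : lastLen (pre ++ [(streak, v)]) = streak := by
      simp [lastLen]
    rw [hlast]

-- ===== VERDICT (by name: the statement is the Claim_ definition above) =====
theorem good_longest_streak_spec : Claim_equal_good_longest_streak := by
  intro arr _ hpre
  unfold Spec_good_longest_streak
  match arr with
  | [] => exact absurd rfl hpre
  | a :: rest =>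
    show good_longest_streak (a :: rest) = good_longest_streak_alt (a :: rest)
    have hseq := seq_eq_runsFrom rest a 1 []
    simp only [List.nil_append] at hseq
    have hA := foldA_eq_runsEval ((rest.foldl aStep1 (a, 1, [])).2.2
        ++ [((rest.foldl aStep1 (a, 1, [])).2.1, (rest.foldl aStep1 (a, 1, [])).1)]) [] (-1) 0 0
    simp only [List.nil_append, List.length_nil, Int.natCast_zero] at hA
    show ((PySem.List.enumerate _ 0).foldl (aStep2 _ _) (-1, 0, 0)).1 = _
    rw [hA]
    show runsEval _ (-1, 0) (lastLen []) 0 = _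
    rw [hseq]
    show _ = bGo (a :: rest) (-1, 0) 0 0
    rw [bGo_eq_runsEval _ _ le_rfl]
    have : rle (a :: rest)
        = (1 + ((rest.takeWhile (fun y => y == a)).length : Int), a)
            :: rle (rest.dropWhile (fun y => y == a)) := by
      rw [rle]
    rw [this, ← runsFrom_eq_rle]
    rfl

def good_longest_streak_raises : Claim_raises_good_longest_streak := by
  unfold Claim_raises_good_longest_streak
  constructor
  · intro arr _ hr
    unfold Pre_good_longest_streak
    simp [Raises_good_longest_streak] at hr
    simp [hr]
  · refine ⟨by decide, by decide, ?_⟩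
    simp [good_longest_streak_alt, pvRaiseWitness_good_longest_streak, pvRaiseWitnessOut_good_longest_streak, bGo]
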